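-- pv_equiv track=rewrite | github.com/Nicholas-Fabugais-Inaba/Sandlot | src/backend/app/functions/gen_sched_input.py | analyze_timeslots
-- ===== SOURCE A (Python) =====
-- def analyze_timeslots(timeslots: dict):
--     field_counts = {}  # Dictionary to store the count of timeslots per field
--     max_timeslots = 0  # Variable to track the maximum number of timeslots for any field
--
--     for timeslot_data in timeslots:
--         field_id = timeslot_data["field_id"]
--
--         # Increment the count for the field
--         if field_id not in field_counts:
--             field_counts[field_id] = 0
--         field_counts[field_id] += 1
--
--         # Update the maximum timeslots if this field has more
--         max_timeslots = max(max_timeslots, field_counts[field_id])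
--
--     # Count the total number of fields
--     total_fields = len(field_counts)
--
--     return total_fields, max_timeslots
-- ===== SOURCE B (Python) =====
-- def analyze_timeslots(timeslots):
--     # Extract the field ids, then recursively peel off one field's entire
--     # group per step: the group's size is a length difference, no dict at all.
--     fids = [ts["field_id"] for ts in timeslots]
--
--     def go(xs):
--         if not xs:
--             return (0, 0)
--         first = xs[0]
--         rest = [y for y in xs if y != first]
--         fields, best = go(rest)
--         return (fields + 1, max(best, len(xs) - len(rest)))
--
--     return go(fids)
-- ===== Notes on version B (the rewrite author's own statement) =====
-- stated objective: alternative
-- what changed: B abandons the frequency dictionary entirely: it extracts the field-id list and recursively peels off one field's whole group per step by partitioning the remaining list (the group size is a length difference), combining (fields+1, max) on the way back up, instead of A's single dict-counting pass with a running max.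
import Mathlib
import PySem

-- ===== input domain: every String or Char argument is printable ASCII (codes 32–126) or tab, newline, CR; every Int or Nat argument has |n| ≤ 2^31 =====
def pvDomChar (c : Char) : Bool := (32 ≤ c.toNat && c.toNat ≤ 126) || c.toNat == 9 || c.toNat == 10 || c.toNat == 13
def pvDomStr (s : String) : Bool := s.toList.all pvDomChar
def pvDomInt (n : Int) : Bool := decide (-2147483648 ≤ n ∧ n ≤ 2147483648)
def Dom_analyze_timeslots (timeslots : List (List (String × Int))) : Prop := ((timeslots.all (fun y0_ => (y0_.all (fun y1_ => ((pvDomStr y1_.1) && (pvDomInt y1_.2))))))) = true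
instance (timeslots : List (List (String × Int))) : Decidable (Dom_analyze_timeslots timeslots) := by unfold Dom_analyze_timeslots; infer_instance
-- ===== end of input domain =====

-- B replaces A's dict-counting pass with a recursive group-extraction: peel off one field's whole
-- group per step by partitioning the list (group size = length difference); objective: alternative.


-- ===== PORT A =====
-- ts["field_id"] for a dict ts modelled as an association list: first pair with key "field_id".
-- Total form (default 0); Pre_ guarantees the key is present, so the default is never the result.
def pyFieldId (ts : List (String × Int)) : Int :=
  ((ts.find? (fun p => p.1 == "field_id")).map Prod.snd).getD 0

def analyze_timeslots (timeslots : List (List (String × Int))) : Int × Int :=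
  let res := timeslots.foldl
    (fun (st : PySem.Dict Int Int × Int) ts =>
      let fid := pyFieldId ts
      let fc := if st.1.contains fid then st.1 else st.1.insert fid 0
      let c := fc.getD fid 0 + 1
      (fc.insert fid c, max st.2 c))
    (PySem.Dict.empty, 0)
  ((res.1.size : Int), res.2)

-- ===== PORT B =====
-- go(xs): recursively remove the first element's whole group, the group size is a length difference.
def goB (xs : List Int) : Int × Int :=
  match xs with
  | [] => (0, 0)
  | x :: t =>
    let rest := (x :: t).filter (fun y => !(y == x))
    let r := goB rest
    (r.1 + 1, max r.2 ((((x :: t).length : Int)) - (rest.length : Int)))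
termination_by xs.length
decreasing_by
  simp only [List.filter_cons, beq_self_eq_true, Bool.not_true, List.length_cons]
  exact Nat.lt_succ_of_le (List.length_filter_le _ _)

def analyze_timeslots_alt (timeslots : List (List (String × Int))) : Int × Int :=
  goB (timeslots.map pyFieldId)

-- ===== PRECONDITION & SPEC =====
-- Pre_ excludes exactly the timeslot dicts missing the key "field_id", on which Python A raises KeyError.
def Pre_analyze_timeslots (timeslots : List (List (String × Int))) : Prop :=
  ∀ ts ∈ timeslots, (ts.any (fun p => p.1 == "field_id")) = true
instance (timeslots : List (List (String × Int))) : Decidable (Pre_analyze_timeslots timeslots) := by unfold Pre_analyze_timeslots; infer_instance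
def pvWitness_analyze_timeslots : (List (List (String × Int))) := [[("field_id", 3)], [("field_id", 3), ("x", 1)], [("field_id", 5)]]

def Spec_analyze_timeslots (timeslots : List (List (String × Int))) (out : Int × Int) : Prop := out = analyze_timeslots_alt timeslots
instance (timeslots : List (List (String × Int))) (out : Int × Int) : Decidable (Spec_analyze_timeslots timeslots out) := by unfold Spec_analyze_timeslots; infer_instance

-- ===== CLAIM (what is proved, stated in full; the proofs are below) =====
def Claim_equal_analyze_timeslots : Prop := ∀ (timeslots : List (List (String × Int))), Dom_analyze_timeslots timeslots → Pre_analyze_timeslots timeslots → Spec_analyze_timeslots timeslots (analyze_timeslots timeslots)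

-- ===== LEMMAS AND PROOFS =====

-- pulling one argument out of a running max
lemma foldl_max_pull (l : List Int) (m x : Int) :
    l.foldl max (max m x) = max (l.foldl max m) x := by
  induction l generalizing m with
  | nil => rfl
  | cons h t ih =>
    simp only [List.foldl_cons]
    rw [max_right_comm m x h, ih]

-- once x is in the accumulator set, filtering the x's out of the remaining input changes nothing
lemma foldl_add_filter (t : List Int) (s : List Int) (x : Int) (hx : x ∈ s) :
    t.foldl PySem.Set.add s = (t.filter (fun y => !(y == x))).foldl PySem.Set.add s := by
  induction t generalizing s with
  | nil => rfl
  | cons y t ih =>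
    by_cases hyx : y = x
    · subst hyx
      have : PySem.Set.add s y = s := by
        simp [PySem.Set.add, PySem.Set.contains, hx]
      simp [this, ih s hx]
    · have hx' : x ∈ PySem.Set.add s y := by
        simp [PySem.Set.add]; split <;> simp [hx]
      simp [hyx, ih _ hx', List.foldl_cons]

-- a head element no later element equals can be split off the accumulator
lemma foldl_add_cons (l : List Int) (s : List Int) (x : Int)
    (h : ∀ y ∈ l, y ≠ x) (hxs : x ∉ s) :
    l.foldl PySem.Set.add (x :: s) = x :: l.foldl PySem.Set.add s := by
  induction l generalizing s with
  | nil => rfl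
  | cons y t ih =>
    have hyx : y ≠ x := h y List.mem_cons_self
    have hcontains : PySem.Set.contains (x :: s) y = PySem.Set.contains s y := by
      simp [PySem.Set.contains, hyx]
    simp only [List.foldl_cons, PySem.Set.add, hcontains]
    by_cases hc : PySem.Set.contains s y = true
    · simp only [hc, if_true]
      exact ih s (fun z hz => h z (List.mem_cons_of_mem _ hz)) hxs
    · simp only [hc, Bool.false_eq_true, if_false]
      have : (x :: s) ++ [y] = x :: (s ++ [y]) := by simp
      rw [this]
      refine ih (s ++ [y]) (fun z hz => h z (List.mem_cons_of_mem _ hz)) ?_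
      simp [hxs, Ne.symm hyx]

-- first-occurrence dedup of a cons: the head, then the dedup of the tail with the head's group removed
lemma ofList_cons_filter (x : Int) (t : List Int) :
    PySem.Set.ofList (x :: t) = x :: PySem.Set.ofList (t.filter (fun y => !(y == x))) := by
  rw [PySem.Set.ofList_eq_foldl, PySem.Set.ofList_eq_foldl]
  simp only [List.foldl_cons]
  have h0 : PySem.Set.add ([] : List Int) x = [x] := by
    simp [PySem.Set.add, PySem.Set.contains]
  rw [h0, foldl_add_filter t [x] x (List.mem_singleton.mpr rfl)]
  exact foldl_add_cons _ [] x (fun y hy => by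
    have := List.of_mem_filter hy; simpa using this) (by simp)

-- the extracted group's size is the head's multiplicity
lemma count_head_eq_length_sub (x : Int) (t : List Int) :
    ((x :: t).count x : Int)
      = ((x :: t).length : Int) - (((x :: t).filter (fun y => !(y == x))).length : Int) := by
  have h1 : (x :: t).count x = ((x :: t).filter (fun y => y == x)).length := by
    simp [List.count, List.countP_eq_length_filter]
  have h2 : ((x :: t).filter (fun y => y == x)).length
      + ((x :: t).filter (fun y => !(y == x))).length = (x :: t).length := by
    simpa using (List.length_eq_length_filter_add (l := x :: t) (f := fun y => y == x)).symm
  omega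

-- B computes (number of distinct elements, max multiplicity) of its input list
lemma goB_spec (xs : List Int) :
    goB xs = (((PySem.Set.ofList xs).length : Int),
      ((PySem.Set.ofList xs).map (fun k => (xs.count k : Int))).foldl max 0) := by
  induction xs using goB.induct with
  | case1 => simp [goB, PySem.Set.ofList]
  | case2 x t rest ih =>
    rw [goB, ih]
    rw [ofList_cons_filter x t]
    have hfilter : (x :: t).filter (fun y => !(y == x)) = rest := rfl
    have ht : t.filter (fun y => !(y == x)) = rest := by
      rw [← hfilter]; simp
    rw [ht, Prod.mk.injEq]
    constructor
    · simp only [List.length_cons]; push_cast; ring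
    · -- second components
      have htail : (PySem.Set.ofList rest).map (fun k => ((x :: t).count k : Int))
          = (PySem.Set.ofList rest).map (fun k => (rest.count k : Int)) := by
        apply List.map_congr_left
        intro k hk
        have hkmem : k ∈ rest := (PySem.Set.mem_ofList _ _).mp hk
        have hkx : k ≠ x := by
          have := List.of_mem_filter (hfilter ▸ hkmem)
          simpa using this
        have : rest.count k = (x :: t).count k := by
          rw [← hfilter]
          rw [List.count_filter]
          simp [hkx]
        rw [this]
      simp only [List.map_cons, List.foldl_cons]
      rw [show (max 0 ((x :: t).count x : Int))
            = max (0 : Int) ((x :: t).count x : Int) from rfl]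
      rw [foldl_max_pull, htail]
      rw [count_head_eq_length_sub x t, hfilter]

-- replacing, in a list of pairs with distinct keys, the value at key k by a value at least as large
lemma foldl_max_map_replace (l : List (Int × Int)) (k v m : Int)
    (hnd : (l.map Prod.fst).Nodup)
    (hle : ∀ p ∈ l, p.1 = k → p.2 ≤ v)
    (hk : k ∈ l.map Prod.fst) :
    ((l.map (fun p => if p.1 == k then (k, v) else p)).map Prod.snd).foldl max m
      = max ((l.map Prod.snd).foldl max m) v := by
  induction l generalizing m with
  | nil => simp at hk
  | cons p t ih =>
    simp only [List.map_cons, List.nodup_cons] at hnd ⊢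
    by_cases hpk : p.1 = k
    · have hne' : ∀ q ∈ t, q.1 ≠ k := by
        intro q hq h
        exact hnd.1 (hpk ▸ h ▸ List.mem_map_of_mem hq)
      have hrest : t.map (fun q => if q.1 == k then (k, v) else q) = t.map id :=
        List.map_congr_left (by intro q hq; simp [hne' q hq])
      rw [List.map_id] at hrest
      simp only [hpk, beq_self_eq_true, if_true, hrest, List.foldl_cons]
      have hpv : p.2 ≤ v := hle p (List.mem_cons_self) hpk
      rw [show max m v = max m (max p.2 v) by rw [max_eq_right hpv],
          ← max_assoc, foldl_max_pull]
    · have hbk : (p.1 == k) = false := by simp [hpk]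
      simp only [hbk, List.foldl_cons, Bool.false_eq_true, if_false]
      have hk' : k ∈ t.map Prod.fst := by
        rcases List.mem_map.mp hk with ⟨q, hq, hqk⟩
        rcases List.mem_cons.mp hq with rfl | hq'
        · exact absurd hqk hpk
        · exact hqk ▸ List.mem_map_of_mem hq'
      exact ih (max m p.2) hnd.2 (fun q hq h => hle q (List.mem_cons_of_mem _ hq) h) hk'

-- one A counting step changes the running max of the table's values by exactly max · (new count)
lemma values_foldl_max_insert (d : PySem.Dict Int Int) (k m : Int) (hnd : d.keys.Nodup) :
    ((d.insert k (d.getD k 0 + 1)).values).foldl max m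
      = max (d.values.foldl max m) (d.getD k 0 + 1) := by
  by_cases hc : d.contains k
  · have hitems := PySem.Dict.items_insert_of_contains (d := d) (k := k) (v := d.getD k 0 + 1) hc
    have hkmem : k ∈ d.items.map Prod.fst := by
      simpa [PySem.Dict.keys] using (PySem.Dict.contains_iff_mem_keys (d := d) (k := k)).mp hc
    have hle : ∀ p ∈ d.items, p.1 = k → p.2 ≤ d.getD k 0 + 1 := by
      intro p hp hpk
      have : d.getD k 0 = p.2 :=
        PySem.Dict.getD_of_mem_items d (hpk ▸ hp) hnd 0
      omega
    have := foldl_max_map_replace d.items k (d.getD k 0 + 1) m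
      (by simpa [PySem.Dict.keys] using hnd) hle hkmem
    simpa [PySem.Dict.values, hitems] using this
  · have hitems := PySem.Dict.items_insert_of_not_contains (d := d)
      (k := k) (v := d.getD k 0 + 1) (by simpa using hc)
    simp [PySem.Dict.values, hitems]

-- A's fold state equals (the counting dict, running max of its values)
lemma fold_state_eq (l : List (List (String × Int))) (d : PySem.Dict Int Int) (m : Int)
    (hnd : d.keys.Nodup) (hm : m = d.values.foldl max 0) :
    l.foldl
      (fun (st : PySem.Dict Int Int × Int) ts =>
        let fid := pyFieldId ts
        let fc := if st.1.contains fid then st.1 else st.1.insert fid 0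
        let c := fc.getD fid 0 + 1
        (fc.insert fid c, max st.2 c))
      (d, m)
    = (l.foldl (fun d ts => d.insert (pyFieldId ts) (d.getD (pyFieldId ts) 0 + 1)) d,
       (l.foldl (fun d ts => d.insert (pyFieldId ts) (d.getD (pyFieldId ts) 0 + 1)) d).values.foldl max 0) := by
  induction l generalizing d m with
  | nil => simp [hm]
  | cons ts t ih =>
    simp only [List.foldl_cons]
    set fid := pyFieldId ts with hfid
    have hstep : (let fc := if d.contains fid then d else d.insert fid 0
                  let c := fc.getD fid 0 + 1
                  ((fc.insert fid c : PySem.Dict Int Int), max m c))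
        = (d.insert fid (d.getD fid 0 + 1), max m (d.getD fid 0 + 1)) := by
      by_cases hc : d.contains fid
      · simp [hc]
      · simp only [Bool.not_eq_true] at hc
        simp only [hc, Bool.false_eq_true, if_false]
        rw [PySem.Dict.getD_insert_self, PySem.Dict.insert_insert_self,
            PySem.Dict.getD_of_not_contains d _ hc]
    simp only [hstep]
    rw [ih (d.insert fid (d.getD fid 0 + 1)) (max m (d.getD fid 0 + 1))
        (PySem.Dict.nodup_keys_insert d fid _ hnd)
        (by rw [values_foldl_max_insert d fid 0 hnd, hm])]

-- ===== VERDICT (by name: the statement is the Claim_ definition above) =====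
theorem analyze_timeslots_spec : Claim_equal_analyze_timeslots := by
  intro timeslots _ _
  unfold Spec_analyze_timeslots analyze_timeslots analyze_timeslots_alt
  simp only
  rw [fold_state_eq timeslots PySem.Dict.empty 0 PySem.Dict.nodup_keys_empty
      (by simp [PySem.Dict.values, PySem.Dict.empty])]
  have hd : timeslots.foldl (fun d ts => d.insert (pyFieldId ts) (d.getD (pyFieldId ts) 0 + 1)) PySem.Dict.empty
      = PySem.Dict.counter (timeslots.map pyFieldId) := by
    rw [← PySem.Dict.foldl_insert_getD_add_one_eq_counter, List.foldl_map]
  rw [hd, goB_spec]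
  rw [Prod.mk.injEq]
  constructor
  · simp [PySem.Dict.size, PySem.Dict.items_counter]
  · simp [PySem.Dict.values, PySem.Dict.items_counter, List.map_map, Function.comp_def]
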